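-- pv_equiv track=rewrite | github.com/alexandrektm/FreeCodeCamp-DailyCodingChallenges | 2025_10/2025_10_31.py | spookify
-- ===== SOURCE A (Python) =====
-- def spookify(boo):
--
--         new_string = []
--         state = 0
--
--         for character in boo:
--
--                 if character in ("-","_"):
--
--                         new_string.append("~")
--                         continue
--
--                 if state == 0:
--
--                         new_string.append(character.upper())
--                         state = 1
--
--                 else:
--
--                         new_string.append(character.lower())
--                         state = 0
--
--         boo_word = "".join(new_string)
--
--         return boo_word
-- ===== SOURCE B (Python) =====
-- def spookify(boo):
--     # Three passes: extract the non-special characters, alternate their case by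
--     # position, then re-insert them while scanning the original string.
--     letters = [c for c in boo if c not in ("-", "_")]
--     transformed = [c.upper() if i % 2 == 0 else c.lower() for i, c in enumerate(letters)]
--     it = iter(transformed)
--     return "".join("~" if c in ("-", "_") else next(it) for c in boo)
-- ===== Notes on version B (the rewrite author's own statement) =====
-- stated objective: alternative
-- what changed: Replaces A's single stateful loop (a 0/1 toggle carried across characters) by a three-pass extract/transform/re-insert pipeline: filter out the dash/underscore separators, alternate case by enumerate index parity on the filtered list, then rebuild the output by scanning the original string, emitting a tilde at separator positions and pulling the next transformed character otherwise.
import Mathlib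
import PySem

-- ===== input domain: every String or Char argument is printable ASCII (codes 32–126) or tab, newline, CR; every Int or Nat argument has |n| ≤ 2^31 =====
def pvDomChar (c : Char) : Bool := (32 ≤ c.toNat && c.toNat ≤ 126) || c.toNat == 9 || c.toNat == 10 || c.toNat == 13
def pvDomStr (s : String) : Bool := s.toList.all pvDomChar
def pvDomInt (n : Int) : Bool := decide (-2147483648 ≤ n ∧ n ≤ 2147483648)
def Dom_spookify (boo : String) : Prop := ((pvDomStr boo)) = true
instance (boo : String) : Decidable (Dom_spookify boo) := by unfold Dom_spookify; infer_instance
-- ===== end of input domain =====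

-- B is an alternative decomposition (extract / alternate-case / re-insert in three passes
-- instead of A's single stateful loop); same cost, no speed claim.

-- ===== PORT A =====
-- A's for-loop: accumulator new_string, toggle state (0/1 Int, as in the Python)
def spookifyLoop : List Char → List Char → Int → List Char
  | [], acc, _ => acc
  | c :: rest, acc, state =>
    if c == '-' || c == '_' then
      spookifyLoop rest (acc ++ ['~']) state
    else if state == 0 then
      spookifyLoop rest (acc ++ [PySem.Chars.upperChar c]) 1
    else
      spookifyLoop rest (acc ++ [PySem.Chars.lowerChar c]) 0

def spookify (boo : String) : String :=
  String.mk (spookifyLoop boo.toList [] 0)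

-- ===== PORT B =====
-- Source B's iterator re-insertion: emit '~' for specials, else pull the next transformed char
def spookifyReinsert : List Char → List Char → List Char
  | [], _ => []
  | c :: rest, ts =>
    if c == '-' || c == '_' then '~' :: spookifyReinsert rest ts
    else
      match ts with
      | [] => []
      | t :: ts' => t :: spookifyReinsert rest ts'

def spookify_alt (boo : String) : String :=
  let letters := boo.toList.filter (fun c => !(c == '-' || c == '_'))
  let transformed := (PySem.List.enumerate letters 0).map (fun ic =>
    if PySem.Int.mod ic.1 2 == 0 then PySem.Chars.upperChar ic.2
    else PySem.Chars.lowerChar ic.2)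
  String.mk (spookifyReinsert boo.toList transformed)

-- ===== PRECONDITION & SPEC =====
def Spec_spookify (boo : String) (out : String) : Prop := out = spookify_alt boo
instance (boo : String) (out : String) : Decidable (Spec_spookify boo out) := by unfold Spec_spookify; infer_instance

-- ===== CLAIM (what is proved, stated in full; the proofs are below) =====
def Claim_equal_spookify : Prop := ∀ (boo : String), Dom_spookify boo → Spec_spookify boo (spookify boo)

-- ===== LEMMAS AND PROOFS =====

-- the accumulator factors out of A's loop
theorem spookifyLoop_acc (chars : List Char) : ∀ (acc : List Char) (s : Int),
    spookifyLoop chars acc s = acc ++ spookifyLoop chars [] s := by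
  induction chars with
  | nil => intro acc s; simp [spookifyLoop]
  | cons c rest ih =>
    intro acc s
    simp only [spookifyLoop]
    split_ifs with h1 h2
    · rw [ih, ih ([] ++ ['~'])]; simp
    · rw [ih, ih ([] ++ [PySem.Chars.upperChar c])]; simp
    · rw [ih, ih ([] ++ [PySem.Chars.lowerChar c])]; simp

-- one step of B's re-insertion on a special / ordinary character
theorem reinsert_special (c : Char) (rest ts : List Char) (h : (c == '-' || c == '_') = true) :
    spookifyReinsert (c :: rest) ts = '~' :: spookifyReinsert rest ts := by
  simp [spookifyReinsert, h]

theorem reinsert_letter (c t : Char) (rest ts : List Char) (h : (c == '-' || c == '_') = false) :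
    spookifyReinsert (c :: rest) (t :: ts) = t :: spookifyReinsert rest ts := by
  simp [spookifyReinsert, h]

-- A's loop with state (s % 2) equals B's reinsertion of the enumerate-from-s transform
theorem spookify_key (chars : List Char) : ∀ (s : Int),
    spookifyLoop chars [] (PySem.Int.mod s 2) =
      spookifyReinsert chars
        ((PySem.List.enumerate (chars.filter (fun c => !(c == '-' || c == '_'))) s).map
          (fun ic => if PySem.Int.mod ic.1 2 == 0 then PySem.Chars.upperChar ic.2
                     else PySem.Chars.lowerChar ic.2)) := by
  induction chars with
  | nil => intro s; simp [spookifyLoop, spookifyReinsert]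
  | cons c rest ih =>
    intro s
    have hm : PySem.Int.mod s 2 = s % 2 :=
      PySem.Int.mod_eq_emod_of_pos (a := s) (b := 2) (by omega)
    have hm1 : PySem.Int.mod (s + 1) 2 = (s + 1) % 2 :=
      PySem.Int.mod_eq_emod_of_pos (a := s + 1) (b := 2) (by omega)
    by_cases hc : (c == '-' || c == '_') = true
    · have hstep : spookifyLoop (c :: rest) [] (PySem.Int.mod s 2)
          = '~' :: spookifyLoop rest [] (PySem.Int.mod s 2) := by
        simp only [spookifyLoop, hc, if_true]
        rw [spookifyLoop_acc]
        simp
      rw [hstep, ih s,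
        List.filter_cons_of_neg (p := fun c => !(c == '-' || c == '_')) (by simp [hc]),
        reinsert_special c rest _ hc]
    · have hcf : (c == '-' || c == '_') = false := by
        simpa using hc
      by_cases h0 : PySem.Int.mod s 2 = 0
      · have h1 : PySem.Int.mod (s + 1) 2 = 1 := by rw [hm1]; rw [hm] at h0; omega
        have hstep : spookifyLoop (c :: rest) [] (PySem.Int.mod s 2)
            = PySem.Chars.upperChar c :: spookifyLoop rest [] 1 := by
          rw [h0]
          simp only [spookifyLoop, hcf, Bool.false_eq_true, if_false, beq_self_eq_true, if_true]
          rw [spookifyLoop_acc]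
          simp
        rw [hstep]
        conv_lhs => rw [h1.symm]
        rw [ih (s + 1),
          List.filter_cons_of_pos (p := fun c => !(c == '-' || c == '_')) (by simp [hcf]),
          PySem.List.enumerate_cons, List.map_cons,
          reinsert_letter c _ rest _ hcf]
        simp
        intro h
        rw [hm] at h0
        omega
      · have hs1 : PySem.Int.mod s 2 = 1 := by rw [hm] at *; omega
        have h1 : PySem.Int.mod (s + 1) 2 = 0 := by rw [hm1]; rw [hm] at hs1; omega
        have hstep : spookifyLoop (c :: rest) [] (PySem.Int.mod s 2)
            = PySem.Chars.lowerChar c :: spookifyLoop rest [] 0 := by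
          rw [hs1]
          simp only [spookifyLoop, hcf, Bool.false_eq_true, if_false]
          rw [if_neg (by decide), spookifyLoop_acc]
          simp
        rw [hstep]
        conv_lhs => rw [h1.symm]
        rw [ih (s + 1),
          List.filter_cons_of_pos (p := fun c => !(c == '-' || c == '_')) (by simp [hcf]),
          PySem.List.enumerate_cons, List.map_cons,
          reinsert_letter c _ rest _ hcf]
        simp
        intro h
        rw [hm] at hs1
        omega

-- ===== VERDICT (by name: the statement is the Claim_ definition above) =====
theorem spookify_spec : Claim_equal_spookify := by
  intro boo _
  unfold Spec_spookify spookify spookify_alt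
  conv_lhs => rw [show (0 : Int) = PySem.Int.mod 0 2 from by decide]
  rw [spookify_key boo.toList 0]
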